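-- pv_equiv track=rewrite | github.com/ThePracticalHow/The_Resolved_Chord | verification/cc_hurricane_proof.py | d_z3_inv
-- ===== SOURCE A (Python) =====
-- def d_z3_inv(l):
--     """Z_3-invariant degeneracy at level l on S^5/Z_3."""
--     from math import comb
--     total = 0
--     for a in range(l+1):
--         b = l - a
--         if (a - b) % 3 == 0:
--             if a >= 1 and b >= 1:
--                 total += comb(a+2,2)*comb(b+2,2) - comb(a+1,2)*comb(b+1,2)
--             elif b == 0:
--                 total += comb(a+2,2)
--             else:
--                 total += comb(b+2,2)
--     return total
-- ===== SOURCE B (Python) =====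
-- def d_z3_inv(l):
--     """Z_3-invariant degeneracy at level l on S^5/Z_3 (closed form, O(1))."""
--     if l < 0:
--         return 0
--     if l == 0:
--         return 1
--     total = 0
--     if l % 3 == 0:
--         total += (l + 1) * (l + 2)  # the two boundary partitions a=0 and a=l
--     r = (2 * l) % 3
--     a0 = 3 if r == 0 else r  # first interior a with a = 2l (mod 3)
--     if a0 <= l - 1:
--         m = (l - 1 - a0) // 3 + 1          # number of interior terms
--         k1 = m * (m - 1) // 2              # sum of k over range(m)
--         k2 = m * (m - 1) * (2 * m - 1) // 6  # sum of k^2 over range(m)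
--         s1 = m * a0 + 3 * k1               # sum of a over the progression
--         s2 = m * a0 * a0 + 6 * a0 * k1 + 9 * k2  # sum of a^2
--         s = (l + 1) * m + l * s1 - s2      # sum of (a+1)(l+1-a)
--         total += (l + 2) * s // 2
--     return total
-- ===== Notes on version B (the rewrite author's own statement) =====
-- stated objective: faster
-- what changed: Replaced A's linear loop over all partitions of the level by a constant-time closed form: the interior summand simplifies to a cubic polynomial, summed in closed form (Faulhaber power sums) over the arithmetic progression of invariant partitions, plus the boundary terms when the level is divisible by three.
import Mathlib
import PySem

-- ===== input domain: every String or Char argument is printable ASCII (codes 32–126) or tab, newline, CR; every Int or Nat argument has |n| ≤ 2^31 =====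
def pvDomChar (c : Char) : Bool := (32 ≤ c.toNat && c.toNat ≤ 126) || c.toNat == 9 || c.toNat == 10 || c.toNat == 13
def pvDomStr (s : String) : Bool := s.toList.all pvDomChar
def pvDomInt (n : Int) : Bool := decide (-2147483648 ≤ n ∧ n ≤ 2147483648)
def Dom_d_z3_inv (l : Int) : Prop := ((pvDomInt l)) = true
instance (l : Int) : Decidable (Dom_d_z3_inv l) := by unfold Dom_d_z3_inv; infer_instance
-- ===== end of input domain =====

-- B replaces A's linear loop over the partitions of l by a closed-form evaluation (Faulhaber
-- power sums over the arithmetic progression of invariant partitions, plus boundary terms).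

-- ===== PORT A =====
-- math.comb(n, 2); exact for n ≥ 0, which covers every call A makes (arguments are ≥ 1)
def pvComb2 (n : Int) : Int := (Nat.choose n.toNat 2 : Int)

def d_z3_inv (l : Int) : Int :=
  (PySem.List.pyRange 0 (l + 1) 1).foldl (fun total a =>
    let b := l - a
    if PySem.Int.mod (a - b) 3 = 0 then
      if 1 ≤ a ∧ 1 ≤ b then
        total + (pvComb2 (a + 2) * pvComb2 (b + 2) - pvComb2 (a + 1) * pvComb2 (b + 1))
      else if b = 0 then
        total + pvComb2 (a + 2)
      else
        total + pvComb2 (b + 2)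
    else total) 0

-- ===== PORT B =====
def d_z3_inv_alt (l : Int) : Int :=
  if l < 0 then 0
  else if l = 0 then 1
  else
    let total : Int := 0
    let total := if PySem.Int.mod l 3 = 0 then total + (l + 1) * (l + 2) else total
    let r := PySem.Int.mod (2 * l) 3
    let a0 := if r = 0 then 3 else r
    if a0 ≤ l - 1 then
      let m := PySem.Int.floordiv (l - 1 - a0) 3 + 1
      let k1 := PySem.Int.floordiv (m * (m - 1)) 2
      let k2 := PySem.Int.floordiv (m * (m - 1) * (2 * m - 1)) 6
      let s1 := m * a0 + 3 * k1
      let s2 := m * a0 * a0 + 6 * a0 * k1 + 9 * k2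
      let s := (l + 1) * m + l * s1 - s2
      total + PySem.Int.floordiv ((l + 2) * s) 2
    else total

-- ===== PRECONDITION & SPEC =====
def Spec_d_z3_inv (l : Int) (out : Int) : Prop := out = d_z3_inv_alt l
instance (l : Int) (out : Int) : Decidable (Spec_d_z3_inv l out) := by unfold Spec_d_z3_inv; infer_instance

-- ===== CLAIM (what is proved, stated in full; the proofs are below) =====
def Claim_equal_d_z3_inv : Prop := ∀ (l : Int), Dom_d_z3_inv l → Spec_d_z3_inv l (d_z3_inv l)

-- ===== LEMMAS AND PROOFS =====

theorem pvChoose2 (n : Nat) : 2 * ((n + 1).choose 2 : Int) = (n : Int) * ((n : Int) + 1) := by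
  induction n with
  | zero => decide
  | succ k ih =>
      rw [show k + 1 + 1 = (k + 1) + 1 from rfl, Nat.choose_succ_succ (k + 1) 1]
      push_cast [Nat.choose_one_right]
      push_cast at ih
      ring_nf
      ring_nf at ih
      linarith

theorem pvComb2_two_mul (a : Int) (h : 0 ≤ a) : 2 * pvComb2 (a + 2) = (a + 1) * (a + 2) := by
  obtain ⟨p, rfl⟩ := Int.eq_ofNat_of_zero_le h
  have h2 : ((p : Int) + 2).toNat = p + 2 := by omega
  have := pvChoose2 (p + 1)
  simp only [pvComb2, h2]
  push_cast at this ⊢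
  linarith

theorem pvComb2_two_mul' (a : Int) (h : 0 ≤ a) : 2 * pvComb2 (a + 1) = a * (a + 1) := by
  obtain ⟨p, rfl⟩ := Int.eq_ofNat_of_zero_le h
  have h2 : ((p : Int) + 1).toNat = p + 1 := by omega
  have := pvChoose2 p
  simp only [pvComb2, h2]
  push_cast at this ⊢
  linarith

theorem pvTerm4 (a b : Int) (ha : 0 ≤ a) (hb : 0 ≤ b) :
    4 * (pvComb2 (a + 2) * pvComb2 (b + 2) - pvComb2 (a + 1) * pvComb2 (b + 1))
      = 2 * ((a + 1) * (b + 1) * (a + b + 2)) := by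
  have h1 := pvComb2_two_mul a ha
  have h2 := pvComb2_two_mul b hb
  have h3 := pvComb2_two_mul' a ha
  have h4 := pvComb2_two_mul' b hb
  linear_combination (2 * pvComb2 (b + 2)) * h1 + (a + 1) * (a + 2) * h2
    - (2 * pvComb2 (b + 1)) * h3 - (a * (a + 1)) * h4

theorem pvReindex (h : Nat → Int) (r : Nat) (hr : r < 3) (N : Nat) :
    ∑ k ∈ Finset.range N, (if k % 3 = r then h k else 0)
      = ∑ j ∈ Finset.range ((N + 2 - r) / 3), h (r + 3 * j) := by
  induction N with
  | zero =>
      rw [show (0 + 2 - r) / 3 = 0 from by omega]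
      simp
  | succ M ih =>
      rw [Finset.sum_range_succ, ih]
      by_cases hM : M % 3 = r
      · rw [if_pos hM, show (M + 1 + 2 - r) / 3 = (M + 2 - r) / 3 + 1 from by omega,
          Finset.sum_range_succ, show r + 3 * ((M + 2 - r) / 3) = M from by omega]
      · rw [if_neg hM, add_zero, show (M + 1 + 2 - r) / 3 = (M + 2 - r) / 3 from by omega]

theorem pvPowSum (c0 c1 c2 : Int) (m : Nat) :
    6 * ∑ j ∈ Finset.range m, (c0 + c1 * (j : Int) + c2 * (j : Int) ^ 2)
      = 6 * c0 * (m : Int) + 3 * c1 * ((m : Int) * ((m : Int) - 1))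
        + c2 * ((m : Int) * ((m : Int) - 1) * (2 * (m : Int) - 1)) := by
  induction m with
  | zero => simp
  | succ M ih =>
      rw [Finset.sum_range_succ, mul_add, ih]
      push_cast
      ring

def pvBody (n k : Nat) : Int :=
  if 1 ≤ k ∧ k < n then
    pvComb2 ((k : Int) + 2) * pvComb2 (((n - k : Nat) : Int) + 2)
      - pvComb2 ((k : Int) + 1) * pvComb2 (((n - k : Nat) : Int) + 1)
  else if k = n then pvComb2 ((k : Int) + 2)
  else pvComb2 ((n : Int) + 2)


theorem pvBody_eq (n k : Nat) (hk : k ≤ n) :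
    (if 1 ≤ (0 + (k : Int)) ∧ 1 ≤ ((n : Int) - (0 + (k : Int))) then
        pvComb2 ((0 + (k : Int)) + 2) * pvComb2 (((n : Int) - (0 + (k : Int))) + 2)
          - pvComb2 ((0 + (k : Int)) + 1) * pvComb2 (((n : Int) - (0 + (k : Int))) + 1)
      else if ((n : Int) - (0 + (k : Int))) = 0 then pvComb2 ((0 + (k : Int)) + 2)
      else pvComb2 (((n : Int) - (0 + (k : Int))) + 2))
    = pvBody n k := by
  unfold pvBody
  by_cases hin : 1 ≤ k ∧ k < n
  · rw [if_pos (by omega : 1 ≤ (0 + (k : Int)) ∧ 1 ≤ ((n : Int) - (0 + (k : Int)))),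
      if_pos hin, show (0 + (k : Int)) = (k : Int) from by omega,
      show (n : Int) - (k : Int) = ((n - k : Nat) : Int) from by omega]
  · rw [if_neg (by omega : ¬(1 ≤ (0 + (k : Int)) ∧ 1 ≤ ((n : Int) - (0 + (k : Int))))), if_neg hin]
    by_cases heq : k = n
    · rw [if_pos (by omega : ((n : Int) - (0 + (k : Int))) = 0), if_pos heq,
        show (0 + (k : Int)) = (k : Int) from by omega]
    · rw [if_neg (by omega : ¬((n : Int) - (0 + (k : Int))) = 0), if_neg heq,
        show ((n : Int) - (0 + (k : Int))) = (n : Int) from by omega]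

theorem pvA_sum (n : Nat) :
    d_z3_inv (n : Int)
      = ∑ k ∈ Finset.range (n + 1), (if k % 3 = (2 * n) % 3 then pvBody n k else 0) := by
  unfold d_z3_inv
  rw [PySem.List.pyRange_one, show ((n : Int) + 1 - 0).toNat = n + 1 from by omega,
    List.foldl_map]
  have hcond : ∀ k : Nat, (PySem.Int.mod ((0 + (k : Int)) - ((n : Int) - (0 + (k : Int)))) 3 = 0)
      ↔ (k % 3 = (2 * n) % 3) := by
    intro k
    rw [PySem.Int.mod_eq_zero_iff_dvd]
    constructor <;> intro h <;> omega
  have hstep : (fun (total : Int) (k : Nat) =>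
      let a : Int := 0 + (k : Int)
      let b := (n : Int) - a
      if PySem.Int.mod (a - b) 3 = 0 then
        if 1 ≤ a ∧ 1 ≤ b then
          total + (pvComb2 (a + 2) * pvComb2 (b + 2) - pvComb2 (a + 1) * pvComb2 (b + 1))
        else if b = 0 then total + pvComb2 (a + 2)
        else total + pvComb2 (b + 2)
      else total)
      = fun (total : Int) (k : Nat) => total +
        (if k % 3 = (2 * n) % 3 then
          (let a : Int := 0 + (k : Int)
           let b := (n : Int) - a
           if 1 ≤ a ∧ 1 ≤ b then
             pvComb2 (a + 2) * pvComb2 (b + 2) - pvComb2 (a + 1) * pvComb2 (b + 1)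
           else if b = 0 then pvComb2 (a + 2)
           else pvComb2 (b + 2))
         else 0) := by
    funext total k
    simp only [hcond k]
    split_ifs <;> ring
  rw [hstep, PySem.List.foldl_add, zero_add]
  rw [show ((List.range (n + 1)).map _).sum = ∑ k ∈ Finset.range (n + 1), _ from rfl]
  refine Finset.sum_congr rfl fun k hk => ?_
  rw [Finset.mem_range] at hk
  by_cases hc : k % 3 = (2 * n) % 3
  · rw [if_pos hc, if_pos hc]
    exact pvBody_eq n k (by omega)
  · rw [if_neg hc, if_neg hc]

theorem pvInterior (n a0 m : Nat) (h1 : 1 ≤ a0) (hm : ∀ j, j < m → a0 + 3 * j < n) :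
    24 * ∑ j ∈ Finset.range m, pvBody n (a0 + 3 * j)
      = 6 * (2 * ((n : Int) + 2) * ((a0 : Int) + 1) * ((n : Int) - a0 + 1)) * m
        + 3 * (6 * ((n : Int) + 2) * ((n : Int) - 2 * a0)) * ((m : Int) * ((m : Int) - 1))
        + (-18 * ((n : Int) + 2)) * ((m : Int) * ((m : Int) - 1) * (2 * (m : Int) - 1)) := by
  have hterm : ∀ j ∈ Finset.range m,
      4 * pvBody n (a0 + 3 * j)
        = (2 * ((n : Int) + 2) * ((a0 : Int) + 1) * ((n : Int) - a0 + 1))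
          + (6 * ((n : Int) + 2) * ((n : Int) - 2 * a0)) * (j : Int)
          + (-18 * ((n : Int) + 2)) * (j : Int) ^ 2 := by
    intro j hj
    rw [Finset.mem_range] at hj
    have hlt := hm j hj
    unfold pvBody
    rw [if_pos (by omega : 1 ≤ a0 + 3 * j ∧ a0 + 3 * j < n)]
    have hc : ((n - (a0 + 3 * j) : Nat) : Int) = (n : Int) - a0 - 3 * j := by omega
    rw [hc]
    have h4 := pvTerm4 ((a0 : Int) + 3 * j) ((n : Int) - a0 - 3 * j) (by omega) (by omega)
    have e1 : ((a0 + 3 * j : Nat) : Int) = (a0 : Int) + 3 * j := by push_cast; ring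
    rw [e1]
    rw [show ((a0 : Int) + 3 * j) + 2 = (((a0 : Int) + 3 * j) + 2) from rfl]
    linear_combination h4
  calc 24 * ∑ j ∈ Finset.range m, pvBody n (a0 + 3 * j)
      = 6 * ∑ j ∈ Finset.range m,
          ((2 * ((n : Int) + 2) * ((a0 : Int) + 1) * ((n : Int) - a0 + 1))
            + (6 * ((n : Int) + 2) * ((n : Int) - 2 * a0)) * (j : Int)
            + (-18 * ((n : Int) + 2)) * (j : Int) ^ 2) := by
        rw [← Finset.sum_congr rfl hterm, ← Finset.mul_sum]
        ring
    _ = _ := pvPowSum _ _ _ m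
theorem pvDvd6 (p : Int) (h2 : (2 : Int) ∣ p) (h3 : (3 : Int) ∣ p) : (6 : Int) ∣ p := by omega

theorem pvCase2 (q : Nat) :
    d_z3_inv ((3 * q + 2 : Nat) : Int) = d_z3_inv_alt ((3 * q + 2 : Nat) : Int) := by
  have hA : d_z3_inv ((3 * q + 2 : Nat) : Int)
      = ∑ j ∈ Finset.range (q + 1), pvBody (3 * q + 2) (1 + 3 * j) := by
    rw [pvA_sum (3 * q + 2), show (2 * (3 * q + 2)) % 3 = 1 from by omega,
      pvReindex (pvBody (3 * q + 2)) 1 (by omega) (3 * q + 2 + 1),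
      show (3 * q + 2 + 1 + 2 - 1) / 3 = q + 1 from by omega]
  have hInt := pvInterior (3 * q + 2) 1 (q + 1) (by omega) (by intro j hj; omega)
  push_cast at hInt hA
  have hm3 : PySem.Int.mod ((3 * q + 2 : Nat) : Int) 3 = 2 := by
    have := PySem.Int.mod_natCast (3 * q + 2) 3
    rw [show (3 * q + 2) % 3 = 2 from by omega] at this
    exact_mod_cast this
  have hm23 : PySem.Int.mod (2 * ((3 * q + 2 : Nat) : Int)) 3 = 1 := by
    have := PySem.Int.mod_natCast (2 * (3 * q + 2)) 3
    rw [show (2 * (3 * q + 2)) % 3 = 1 from by omega] at this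
    rw [show (2 * ((3 * q + 2 : Nat) : Int)) = ((2 * (3 * q + 2) : Nat) : Int) from by push_cast; ring]
    exact_mod_cast this
  obtain ⟨u, hu⟩ := Int.even_mul_succ_self ((q : Nat) : Int)
  have h2div : ((q : Int) + 1) * (q : Int) = 2 * u := by linarith
  have h3div : (3 : Int) ∣ ((q : Int) + 1) * (q : Int) * (2 * ((q : Int) + 1) - 1) := by
    have hc : q % 3 = 0 ∨ q % 3 = 1 ∨ q % 3 = 2 := by omega
    rcases hc with hc | hc | hc
    · obtain ⟨t, ht⟩ : ∃ t, q = 3 * t := ⟨q / 3, by omega⟩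
      exact ⟨((q : Int) + 1) * t * (2 * ((q : Int) + 1) - 1), by rw [ht]; push_cast; ring⟩
    · obtain ⟨t, ht⟩ : ∃ t, q = 3 * t + 1 := ⟨q / 3, by omega⟩
      exact ⟨((q : Int) + 1) * (q : Int) * (2 * t + 1), by rw [ht]; push_cast; ring⟩
    · obtain ⟨t, ht⟩ : ∃ t, q = 3 * t + 2 := ⟨q / 3, by omega⟩
      exact ⟨(t + 1) * (q : Int) * (2 * ((q : Int) + 1) - 1), by rw [ht]; push_cast; ring⟩
  obtain ⟨v, hv⟩ := pvDvd6 (((q : Int) + 1) * (q : Int) * (2 * ((q : Int) + 1) - 1))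
    ⟨u * (2 * ((q : Int) + 1) - 1), by linear_combination (2 * ((q : Int) + 1) - 1) * h2div⟩ h3div
  simp only [d_z3_inv_alt, hm3, hm23]
  norm_num
  rw [if_neg (show ¬(3 * (q : Int) + 2 < 0) from by omega),
    if_neg (show ¬(3 * (q : Int) + 2 = 0) from by omega),
    if_pos (show (1 : Int) < 3 * (q : Int) + 2 from by omega),
    show (3 * (q : Int) + 2 - 1 - 1) / 3 = (q : Int) from by omega,
    show ((q : Int) + 1) * (q : Int) / 2 = u from by
      rw [h2div, Int.mul_ediv_cancel_left u (by norm_num)],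
    show ((q : Int) + 1) * (q : Int) * (2 * ((q : Int) + 1) - 1) / 6 = v from by
      rw [hv, Int.mul_ediv_cancel_left v (by norm_num)]]
  rw [hA]
  have h12 : 12 * ((3 * (q : Int) + 2 + 2) *
        ((3 * (q : Int) + 2 + 1) * ((q : Int) + 1)
          + (3 * (q : Int) + 2) * ((q : Int) + 1 + 3 * u)
          - ((q : Int) + 1 + 6 * u + 9 * v)))
      = 24 * ∑ j ∈ Finset.range (q + 1), pvBody (3 * q + 2) (1 + 3 * j) := by
    linear_combination (-1 : Int) * hInt
      + (-6 * (3 * (q : Int) + 4) * (3 * (3 * (q : Int) + 2) - 6)) * h2div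
      + (18 * (3 * (q : Int) + 4)) * hv
  have hBig : (3 * (q : Int) + 2 + 2) *
        ((3 * (q : Int) + 2 + 1) * ((q : Int) + 1)
          + (3 * (q : Int) + 2) * ((q : Int) + 1 + 3 * u)
          - ((q : Int) + 1 + 6 * u + 9 * v))
      = 2 * ∑ j ∈ Finset.range (q + 1), pvBody (3 * q + 2) (1 + 3 * j) := by linarith
  rw [hBig, Int.mul_ediv_cancel_left _ (by norm_num : (2 : Int) ≠ 0)]

theorem pvCase1 (q : Nat) :
    d_z3_inv ((3 * q + 1 : Nat) : Int) = d_z3_inv_alt ((3 * q + 1 : Nat) : Int) := by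
  rcases Nat.eq_zero_or_pos q with hq | hq
  · subst hq; decide
  have hA : d_z3_inv ((3 * q + 1 : Nat) : Int)
      = ∑ j ∈ Finset.range q, pvBody (3 * q + 1) (2 + 3 * j) := by
    rw [pvA_sum (3 * q + 1), show (2 * (3 * q + 1)) % 3 = 2 from by omega,
      pvReindex (pvBody (3 * q + 1)) 2 (by omega) (3 * q + 1 + 1),
      show (3 * q + 1 + 1 + 2 - 2) / 3 = q from by omega]
  have hInt := pvInterior (3 * q + 1) 2 q (by omega) (by intro j hj; omega)
  push_cast at hInt hA
  have hm3 : PySem.Int.mod ((3 * q + 1 : Nat) : Int) 3 = 1 := by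
    have := PySem.Int.mod_natCast (3 * q + 1) 3
    rw [show (3 * q + 1) % 3 = 1 from by omega] at this
    exact_mod_cast this
  have hm23 : PySem.Int.mod (2 * ((3 * q + 1 : Nat) : Int)) 3 = 2 := by
    have := PySem.Int.mod_natCast (2 * (3 * q + 1)) 3
    rw [show (2 * (3 * q + 1)) % 3 = 2 from by omega] at this
    rw [show (2 * ((3 * q + 1 : Nat) : Int)) = ((2 * (3 * q + 1) : Nat) : Int) from by push_cast; ring]
    exact_mod_cast this
  obtain ⟨u, hu⟩ := Int.even_mul_succ_self ((q : Int) - 1)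
  have h2div : (q : Int) * ((q : Int) - 1) = 2 * u := by linarith
  have h3div : (3 : Int) ∣ (q : Int) * ((q : Int) - 1) * (2 * (q : Int) - 1) := by
    have hc : q % 3 = 0 ∨ q % 3 = 1 ∨ q % 3 = 2 := by omega
    rcases hc with hc | hc | hc
    · obtain ⟨t, ht⟩ : ∃ t, q = 3 * t := ⟨q / 3, by omega⟩
      exact ⟨t * ((q : Int) - 1) * (2 * (q : Int) - 1), by rw [ht]; push_cast; ring⟩
    · obtain ⟨t, ht⟩ : ∃ t, q = 3 * t + 1 := ⟨q / 3, by omega⟩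
      exact ⟨(q : Int) * t * (2 * (q : Int) - 1), by rw [ht]; push_cast; ring⟩
    · obtain ⟨t, ht⟩ : ∃ t, q = 3 * t + 2 := ⟨q / 3, by omega⟩
      exact ⟨(q : Int) * ((q : Int) - 1) * (2 * t + 1), by rw [ht]; push_cast; ring⟩
  obtain ⟨v, hv⟩ := pvDvd6 ((q : Int) * ((q : Int) - 1) * (2 * (q : Int) - 1))
    ⟨u * (2 * (q : Int) - 1), by linear_combination (2 * (q : Int) - 1) * h2div⟩ h3div
  simp only [d_z3_inv_alt, hm3, hm23]
  norm_num
  rw [if_neg (show ¬(3 * (q : Int) + 1 < 0) from by omega),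
    if_neg (show ¬(3 * (q : Int) + 1 = 0) from by omega),
    if_pos (show (2 : Int) ≤ 3 * (q : Int) from by omega),
    show (3 * (q : Int) - 2) / 3 = (q : Int) - 1 from by omega,
    show (q : Int) - 1 + 1 = (q : Int) from by ring,
    show (q : Int) * ((q : Int) - 1) / 2 = u from by
      rw [h2div, Int.mul_ediv_cancel_left u (by norm_num)],
    show (q : Int) * ((q : Int) - 1) * (2 * (q : Int) - 1) / 6 = v from by
      rw [hv, Int.mul_ediv_cancel_left v (by norm_num)]]
  rw [hA]
  have h12 : 12 * ((3 * (q : Int) + 1 + 2) *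
        ((3 * (q : Int) + 1 + 1) * (q : Int)
          + (3 * (q : Int) + 1) * ((q : Int) * 2 + 3 * u)
          - ((q : Int) * 2 * 2 + 12 * u + 9 * v)))
      = 24 * ∑ j ∈ Finset.range q, pvBody (3 * q + 1) (2 + 3 * j) := by
    linear_combination (-1 : Int) * hInt
      + (-6 * (3 * (q : Int) + 3) * (3 * (3 * (q : Int) + 1) - 12)) * h2div
      + (18 * (3 * (q : Int) + 3)) * hv
  have hBig : (3 * (q : Int) + 1 + 2) *
        ((3 * (q : Int) + 1 + 1) * (q : Int)
          + (3 * (q : Int) + 1) * ((q : Int) * 2 + 3 * u)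
          - ((q : Int) * 2 * 2 + 12 * u + 9 * v))
      = 2 * ∑ j ∈ Finset.range q, pvBody (3 * q + 1) (2 + 3 * j) := by linarith
  rw [hBig, Int.mul_ediv_cancel_left _ (by norm_num : (2 : Int) ≠ 0)]

theorem pvCase0 (q : Nat) :
    d_z3_inv ((3 * q + 3 : Nat) : Int) = d_z3_inv_alt ((3 * q + 3 : Nat) : Int) := by
  rcases Nat.eq_zero_or_pos q with hq | hq
  · subst hq; decide
  have hA : d_z3_inv ((3 * q + 3 : Nat) : Int)
      = (∑ j ∈ Finset.range q, pvBody (3 * q + 3) (3 + 3 * j))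
        + pvBody (3 * q + 3) 0 + pvBody (3 * q + 3) (3 * q + 3) := by
    rw [pvA_sum (3 * q + 3), show (2 * (3 * q + 3)) % 3 = 0 from by omega,
      pvReindex (pvBody (3 * q + 3)) 0 (by omega) (3 * q + 3 + 1),
      show (3 * q + 3 + 1 + 2 - 0) / 3 = q + 2 from by omega,
      Finset.sum_range_succ, Finset.sum_range_succ']
    simp only [show ∀ j : Nat, 0 + 3 * (j + 1) = 3 + 3 * j from fun j => by omega,
      show (0 : Nat) + 3 * 0 = 0 from by omega,
      show 3 + 3 * q = 3 * q + 3 from by omega]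
  have hB0 : pvBody (3 * q + 3) 0 = pvComb2 (((3 * q + 3 : Nat) : Int) + 2) := by
    unfold pvBody
    rw [if_neg (by omega), if_neg (by omega)]
  have hBn : pvBody (3 * q + 3) (3 * q + 3) = pvComb2 (((3 * q + 3 : Nat) : Int) + 2) := by
    unfold pvBody
    rw [if_neg (by omega), if_pos rfl]
  rw [hB0, hBn] at hA
  have hInt := pvInterior (3 * q + 3) 3 q (by omega) (by intro j hj; omega)
  have hcomb := pvComb2_two_mul (3 * (q : Int) + 3) (by omega)
  push_cast at hInt hA
  have hm3 : PySem.Int.mod ((3 * q + 3 : Nat) : Int) 3 = 0 := by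
    have := PySem.Int.mod_natCast (3 * q + 3) 3
    rw [show (3 * q + 3) % 3 = 0 from by omega] at this
    exact_mod_cast this
  have hm23 : PySem.Int.mod (2 * ((3 * q + 3 : Nat) : Int)) 3 = 0 := by
    have := PySem.Int.mod_natCast (2 * (3 * q + 3)) 3
    rw [show (2 * (3 * q + 3)) % 3 = 0 from by omega] at this
    rw [show (2 * ((3 * q + 3 : Nat) : Int)) = ((2 * (3 * q + 3) : Nat) : Int) from by push_cast; ring]
    exact_mod_cast this
  obtain ⟨u, hu⟩ := Int.even_mul_succ_self ((q : Int) - 1)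
  have h2div : (q : Int) * ((q : Int) - 1) = 2 * u := by linarith
  have h3div : (3 : Int) ∣ (q : Int) * ((q : Int) - 1) * (2 * (q : Int) - 1) := by
    have hc : q % 3 = 0 ∨ q % 3 = 1 ∨ q % 3 = 2 := by omega
    rcases hc with hc | hc | hc
    · obtain ⟨t, ht⟩ : ∃ t, q = 3 * t := ⟨q / 3, by omega⟩
      exact ⟨t * ((q : Int) - 1) * (2 * (q : Int) - 1), by rw [ht]; push_cast; ring⟩
    · obtain ⟨t, ht⟩ : ∃ t, q = 3 * t + 1 := ⟨q / 3, by omega⟩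
      exact ⟨(q : Int) * t * (2 * (q : Int) - 1), by rw [ht]; push_cast; ring⟩
    · obtain ⟨t, ht⟩ : ∃ t, q = 3 * t + 2 := ⟨q / 3, by omega⟩
      exact ⟨(q : Int) * ((q : Int) - 1) * (2 * t + 1), by rw [ht]; push_cast; ring⟩
  obtain ⟨v, hv⟩ := pvDvd6 ((q : Int) * ((q : Int) - 1) * (2 * (q : Int) - 1))
    ⟨u * (2 * (q : Int) - 1), by linear_combination (2 * (q : Int) - 1) * h2div⟩ h3div
  simp only [d_z3_inv_alt, hm3, hm23]
  norm_num
  rw [if_neg (show ¬(3 * (q : Int) + 3 < 0) from by omega),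
    if_neg (show ¬(3 * (q : Int) + 3 = 0) from by omega),
    if_pos hq,
    show (3 * (q : Int) + 3 - 1 - 3) / 3 = (q : Int) - 1 from by omega,
    show (q : Int) - 1 + 1 = (q : Int) from by ring,
    show (q : Int) * ((q : Int) - 1) / 2 = u from by
      rw [h2div, Int.mul_ediv_cancel_left u (by norm_num)],
    show (q : Int) * ((q : Int) - 1) * (2 * (q : Int) - 1) / 6 = v from by
      rw [hv, Int.mul_ediv_cancel_left v (by norm_num)]]
  rw [hA]
  have h12 : 12 * ((3 * (q : Int) + 3 + 2) *
        ((3 * (q : Int) + 3 + 1) * (q : Int)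
          + (3 * (q : Int) + 3) * ((q : Int) * 3 + 3 * u)
          - ((q : Int) * 3 * 3 + 18 * u + 9 * v)))
      = 24 * ∑ j ∈ Finset.range q, pvBody (3 * q + 3) (3 + 3 * j) := by
    linear_combination (-1 : Int) * hInt
      + (-6 * (3 * (q : Int) + 5) * (3 * (3 * (q : Int) + 3) - 18)) * h2div
      + (18 * (3 * (q : Int) + 5)) * hv
  have hBig : (3 * (q : Int) + 3 + 2) *
        ((3 * (q : Int) + 3 + 1) * (q : Int)
          + (3 * (q : Int) + 3) * ((q : Int) * 3 + 3 * u)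
          - ((q : Int) * 3 * 3 + 18 * u + 9 * v))
      = 2 * ∑ j ∈ Finset.range q, pvBody (3 * q + 3) (3 + 3 * j) := by linarith
  rw [hBig, Int.mul_ediv_cancel_left _ (by norm_num : (2 : Int) ≠ 0)]
  linarith [hcomb]

-- ===== VERDICT (by name: the statement is the Claim_ definition above) =====
theorem d_z3_inv_spec : Claim_equal_d_z3_inv := by
  intro l _
  show d_z3_inv l = d_z3_inv_alt l
  rcases lt_trichotomy l 0 with hl | hl | hl
  · have hA : d_z3_inv l = 0 := by
      unfold d_z3_inv
      rw [PySem.List.pyRange_one_eq_nil (by omega)]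
      rfl
    have hB : d_z3_inv_alt l = 0 := by unfold d_z3_inv_alt; rw [if_pos hl]
    rw [hA, hB]
  · subst hl; decide
  · lift l to Nat using (by omega : (0 : Int) ≤ l)
    have hn : 1 ≤ l := by exact_mod_cast hl
    have hc : l % 3 = 0 ∨ l % 3 = 1 ∨ l % 3 = 2 := by omega
    rcases hc with hc | hc | hc
    · obtain ⟨q, rfl⟩ : ∃ q, l = 3 * q + 3 := ⟨l / 3 - 1, by omega⟩
      exact pvCase0 q
    · obtain ⟨q, rfl⟩ : ∃ q, l = 3 * q + 1 := ⟨l / 3, by omega⟩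
      exact pvCase1 q
    · obtain ⟨q, rfl⟩ : ∃ q, l = 3 * q + 2 := ⟨l / 3, by omega⟩
      exact pvCase2 q
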